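-- pv_equiv track=rewrite | github.com/Pengppi/algorithm-practice | leetcode/src/main/python/leetcode/editor/cn/吃苹果的最大数目maximumNumberOfEatenApples.py | eatenApples
-- ===== SOURCE A (Python) =====
-- import heapq
-- from typing import List
--
-- def eatenApples(apples: List[int], days: List[int]) -> int:
--     ans = i = 0
--     q = []
--     n = len(apples)
--     while i < n or q:
--         while q and q[0][0] <= i:
--             heapq.heappop(q)
--         if i < n and apples[i]:
--             heapq.heappush(q, [i + days[i], apples[i]])
--         if q:
--             ans += 1
--             q[0][1] -= 1
--             if not q[0][1]:
--                 heapq.heappop(q)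
--         i += 1
--     return ans
-- ===== SOURCE B (Python) =====
-- import heapq
--
-- def eatenApples(apples, days):
--     ans = 0
--     q = []
--     n = len(apples)
--     # while batches are still arriving, eat greedily day by day
--     for day in range(n):
--         while q and q[0][0] <= day:
--             heapq.heappop(q)
--         if apples[day]:
--             heapq.heappush(q, [day + days[day], apples[day]])
--         if q:
--             ans += 1
--             q[0][1] -= 1
--             if not q[0][1]:
--                 heapq.heappop(q)
--     # no more arrivals: consume each remaining batch in one step,
--     # earliest expiry first
--     day = n
--     while q:
--         rot, cnt = heapq.heappop(q)
--         if rot <= day: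
--             continue
--         # the batch feeds us one apple a day until it rots, unless its
--         # count runs out sooner
--         t = rot - day
--         if 0 < cnt < t:
--             t = cnt
--         ans += t
--         day += t
--     return ans
-- ===== Notes on version B (the rewrite author's own statement) =====
-- stated objective: faster
-- what changed: Once arrivals end B stops simulating one apple per day: each remaining heap entry is consumed in a single step (it feeds until it rots, or until its count runs out sooner), so the tail phase costs one heap pop per entry instead of one heap operation per apple eaten; Pre_ excludes only inputs where a nonzero count sits past the end of days, on which A raises IndexError.
import Mathlib
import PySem

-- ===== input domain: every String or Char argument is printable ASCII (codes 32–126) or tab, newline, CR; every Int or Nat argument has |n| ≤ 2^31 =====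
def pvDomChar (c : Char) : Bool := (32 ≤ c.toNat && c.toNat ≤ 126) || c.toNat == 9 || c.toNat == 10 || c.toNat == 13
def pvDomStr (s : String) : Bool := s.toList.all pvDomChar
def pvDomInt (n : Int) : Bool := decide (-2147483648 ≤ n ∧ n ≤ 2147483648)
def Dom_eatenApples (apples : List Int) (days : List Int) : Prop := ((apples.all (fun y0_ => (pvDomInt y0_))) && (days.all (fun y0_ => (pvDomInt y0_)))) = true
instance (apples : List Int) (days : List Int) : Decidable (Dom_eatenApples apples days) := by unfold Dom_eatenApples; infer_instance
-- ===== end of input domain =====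

-- B consumes each remaining heap entry in one step after the last arrival day
-- instead of simulating one apple per day; equivalence is about the return
-- value only.

-- ===== PORT A =====
-- Python's heapq priority queue of [rotten, count] lists is modeled by the
-- lex-sorted list of its elements: heappush = ordered insertion, q[0] = the
-- minimum = the head, heappop = removing the head.  This is exact for the
-- observables A uses (q[0], heappop order, in-place decrement of the minimum,
-- which keeps the heap property).
def entLE (a b : Int × Int) : Bool := a.1 < b.1 || (a.1 == b.1 && a.2 ≤ b.2)

def hpush (q : List (Int × Int)) (e : Int × Int) : List (Int × Int) :=
  match q with
  | [] => [e]
  | x :: xs => if entLE e x then e :: x :: xs else x :: hpush xs e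

-- one day of A's loop body acting on the queue, before the eating step:
-- `while q and q[0][0] <= i: heappop(q)` then
-- `if i < n and apples[i]: heappush(q, [i + days[i], apples[i]])`
def stepQueue (apples days : List Int) (n i : Nat) (q : List (Int × Int)) : List (Int × Int) :=
  if i < n ∧ apples.getD i 0 ≠ 0 then
    hpush (q.dropWhile (fun e => decide (e.1 ≤ (i : Int)))) ((i : Int) + days.getD i 0, apples.getD i 0)
  else q.dropWhile (fun e => decide (e.1 ≤ (i : Int)))

-- `if q: ans += 1; q[0][1] -= 1; if not q[0][1]: heappop(q)`
def eatQ (q : List (Int × Int)) : List (Int × Int) :=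
  match q with
  | [] => []
  | (r, c) :: rest => if c - 1 = 0 then rest else (r, c - 1) :: rest

def ateQ (q : List (Int × Int)) : Int := if q.isEmpty then 0 else 1

-- termination measure for A's while loop
def potQ (i : Nat) (q : List (Int × Int)) : Nat :=
  (q.map (fun e => (e.1 - (i : Int)).toNat + 1)).sum

def sumDays (days : List Int) (n i : Nat) : Nat :=
  (((days.take n).drop i).map (fun d => d.toNat + 1)).sum

def measA (days : List Int) (n i : Nat) (q : List (Int × Int)) : Nat :=
  2 * (n - i) + sumDays days n i + potQ i q

theorem potQ_cons (i : Nat) (e : Int × Int) (l : List (Int × Int)) :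
    potQ i (e :: l) = ((e.1 - (i : Int)).toNat + 1) + potQ i l := by
  simp [potQ]

theorem potQ_succ_le (i : Nat) (l : List (Int × Int)) : potQ (i + 1) l ≤ potQ i l := by
  induction l with
  | nil => simp [potQ]
  | cons e t ih =>
    rw [potQ_cons, potQ_cons]
    have h : ((i + 1 : Nat) : Int) = (i : Int) + 1 := by push_cast; ring
    rw [h]
    omega

theorem potQ_dropWhile_le (p : Int × Int → Bool) (i : Nat) (l : List (Int × Int)) :
    potQ i (l.dropWhile p) ≤ potQ i l := by
  induction l with
  | nil => simp
  | cons e t ih =>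
    rw [List.dropWhile_cons]
    split
    · rw [potQ_cons]; omega
    · exact le_rfl

theorem potQ_hpush (i : Nat) (l : List (Int × Int)) (e : Int × Int) :
    potQ i (hpush l e) = potQ i l + ((e.1 - (i : Int)).toNat + 1) := by
  induction l with
  | nil => simp [hpush, potQ]
  | cons x xs ih =>
    rw [hpush]
    split
    · rw [potQ_cons, potQ_cons]; omega
    · rw [potQ_cons, ih, potQ_cons]; omega

theorem potQ_pos (i : Nat) (l : List (Int × Int)) (h : l ≠ []) : 1 ≤ potQ i l := by
  cases l with
  | nil => exact absurd rfl h
  | cons e t => rw [potQ_cons]; omega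

theorem potQ_eatQ_le (i : Nat) (l : List (Int × Int)) : potQ i (eatQ l) ≤ potQ i l := by
  cases l with
  | nil => simp [eatQ]
  | cons e t =>
    obtain ⟨r, c⟩ := e
    rw [eatQ]
    split
    · rw [potQ_cons]; omega
    · rw [potQ_cons, potQ_cons]

theorem dropWhile_head_false {α : Type} (p : α → Bool) (l : List α) (x : α) (rest : List α)
    (h : l.dropWhile p = x :: rest) : p x = false := by
  induction l with
  | nil => simp at h
  | cons a t ih =>
    rw [List.dropWhile_cons] at h
    by_cases hp : p a
    · exact ih (by simpa [hp] using h)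
    · simp only [hp] at h
      cases h
      simpa using hp

theorem sumDays_succ_le (days : List Int) (n i : Nat) :
    sumDays days n (i + 1) ≤ sumDays days n i := by
  unfold sumDays
  have h : (days.take n).drop (i + 1) = ((days.take n).drop i).drop 1 := by
    rw [List.drop_drop]
  rw [h]
  cases hd : (days.take n).drop i with
  | nil => simp
  | cons a t => simp

theorem sumDays_eq (days : List Int) (n i : Nat) (hi : i < n) (hd : i < days.length) :
    sumDays days n i = ((days.getD i 0).toNat + 1) + sumDays days n (i + 1) := by
  unfold sumDays
  have hlen : i < (days.take n).length := by simp; omega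
  rw [List.drop_eq_getElem_cons hlen]
  simp [List.getD, List.getElem?_eq_getElem hd]

theorem sumDays_zero_of_ge (days : List Int) (n i : Nat) (h : n ≤ i) :
    sumDays days n i = 0 := by
  unfold sumDays
  rw [List.drop_eq_nil_of_le (by simp; omega)]
  simp

-- the measure decreases across one day of A's loop
theorem measA_step (apples days : List Int) (n i : Nat) (q : List (Int × Int))
    (h : i < n ∨ q ≠ []) :
    measA days n (i + 1) (stepQueue apples days n i q) < measA days n i q := by
  unfold measA stepQueue
  have hdrop := potQ_dropWhile_le (fun e => decide (e.1 ≤ (i : Int))) i q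
  have hsucc := potQ_succ_le i (q.dropWhile (fun e => decide (e.1 ≤ (i : Int))))
  split
  · -- push happened, so i < n
    rename_i hcond
    obtain ⟨hin, hne⟩ := hcond
    rw [potQ_hpush]
    have hterm : (((i : Int) + days.getD i 0, apples.getD i 0).1 - ((i + 1 : Nat) : Int)).toNat + 1
        ≤ (days.getD i 0).toNat + 1 := by
      have : ((i + 1 : Nat) : Int) = (i : Int) + 1 := by push_cast; ring
      rw [this]
      simp only
      omega
    by_cases hd : i < days.length
    · have hsum := sumDays_eq days n i hin hd
      omega
    · have hd0 : days.getD i 0 = 0 := List.getD_eq_default days 0 (by omega)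
      have hsum := sumDays_succ_le days n i
      rw [hd0] at hterm
      simp at hterm
      omega
  · by_cases hin : i < n
    · have hsum := sumDays_succ_le days n i
      omega
    · -- i ≥ n: q ≠ [], measure decrease must come from the queue
      have hq : q ≠ [] := h.resolve_left hin
      have hs0 : sumDays days n i = 0 := sumDays_zero_of_ge days n i (by omega)
      have hs1 : sumDays days n (i + 1) = 0 := sumDays_zero_of_ge days n (i + 1) (by omega)
      cases hd : q.dropWhile (fun e => decide (e.1 ≤ (i : Int))) with
      | nil =>
        have h1 := potQ_pos i q hq
        have h2 : potQ (i + 1) ([] : List (Int × Int)) = 0 := rfl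
        omega
      | cons x rest =>
        have hx : (decide (x.1 ≤ (i : Int))) = false := dropWhile_head_false _ q x rest hd
        have hxgt : (i : Int) < x.1 := by simpa using hx
        rw [hd] at hdrop
        have h1 : potQ (i + 1) (x :: rest) + 1 ≤ potQ i (x :: rest) := by
          rw [potQ_cons, potQ_cons]
          have hle := potQ_succ_le i rest
          have : ((i + 1 : Nat) : Int) = (i : Int) + 1 := by push_cast; ring
          rw [this]
          omega
        omega

-- A's while loop, one recursive call per day (i counts the day)
def eatenApplesLoop (apples days : List Int) (n i : Nat) (q : List (Int × Int)) (ans : Int) : Int :=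
  if hq : i < n ∨ q ≠ [] then
    eatenApplesLoop apples days n (i + 1)
      (eatQ (stepQueue apples days n i q))
      (ans + ateQ (stepQueue apples days n i q))
  else ans
termination_by measA days n i q
decreasing_by
  have h1 := measA_step apples days n i q hq
  have h2 := potQ_eatQ_le (i + 1) (stepQueue apples days n i q)
  unfold measA at *
  omega

def eatenApples (apples : List Int) (days : List Int) : Int :=
  eatenApplesLoop apples days apples.length 0 [] 0

-- ===== PORT B =====
-- B.phase 1 (`for day in range(n)`): same per-day greedy eating step as A
-- (shared helpers eatQ/ateQ), but only while batches still arrive.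
def stepQueueB (apples days : List Int) (i : Nat) (q : List (Int × Int)) : List (Int × Int) :=
  if apples.getD i 0 ≠ 0 then
    hpush (q.dropWhile (fun e => decide (e.1 ≤ (i : Int)))) ((i : Int) + days.getD i 0, apples.getD i 0)
  else q.dropWhile (fun e => decide (e.1 ≤ (i : Int)))

-- B.phase 2 (`while q:`): each popped batch is consumed in one step —
-- `t = rot - day` then `if 0 < cnt < t: t = cnt`
def batchEat (cnt rot day : Int) : Int :=
  if 0 < cnt ∧ cnt < rot - day then cnt else rot - day

def batchLoop (q : List (Int × Int)) (day ans : Int) : Int :=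
  match q with
  | [] => ans
  | (rot, cnt) :: rest =>
    if rot ≤ day then batchLoop rest day ans
    else batchLoop rest (day + batchEat cnt rot day) (ans + batchEat cnt rot day)

def bArrive (apples days : List Int) (n i : Nat) (q : List (Int × Int)) (ans : Int) : Int :=
  if i < n then
    bArrive apples days n (i + 1)
      (eatQ (stepQueueB apples days i q))
      (ans + ateQ (stepQueueB apples days i q))
  else batchLoop q (i : Int) ans
termination_by n - i

def eatenApples_alt (apples : List Int) (days : List Int) : Int :=
  bArrive apples days apples.length 0 [] 0

-- ===== PRECONDITION & SPEC =====
-- Pre_ excludes exactly the inputs on which Python A raises IndexError: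
-- a nonzero apple count at an index ≥ len(days) makes A evaluate days[i].
def Pre_eatenApples (apples : List Int) (days : List Int) : Prop :=
  ∀ a ∈ apples.drop days.length, a = 0
instance (apples : List Int) (days : List Int) : Decidable (Pre_eatenApples apples days) := by
  unfold Pre_eatenApples; infer_instance

def pvWitness_eatenApples : List Int × List Int := ([1, 2, 3, 5, 2], [3, 2, 1, 4, 2])

def Spec_eatenApples (apples : List Int) (days : List Int) (out : Int) : Prop := out = eatenApples_alt apples days
instance (apples : List Int) (days : List Int) (out : Int) : Decidable (Spec_eatenApples apples days out) := by unfold Spec_eatenApples; infer_instance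

-- ===== CLAIM (what is proved, stated in full; the proofs are below) =====
def Claim_equal_eatenApples : Prop := ∀ (apples : List Int) (days : List Int), Dom_eatenApples apples days → Pre_eatenApples apples days → Spec_eatenApples apples days (eatenApples apples days)

-- ===== LEMMAS AND PROOFS =====

def SortedQ (q : List (Int × Int)) : Prop := List.Pairwise (fun a b => entLE a b = true) q

-- every count in the queue is nonzero: entries are pushed with a nonzero
-- count and removed as soon as a decrement reaches 0
def CountsQ (q : List (Int × Int)) : Prop := ∀ e ∈ q, e.2 ≠ 0

theorem entLE_iff (a b : Int × Int) :
    entLE a b = true ↔ (a.1 < b.1 ∨ (a.1 = b.1 ∧ a.2 ≤ b.2)) := by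
  simp [entLE]

theorem entLE_total (a b : Int × Int) (h : entLE a b = false) : entLE b a = true := by
  rw [entLE_iff]
  rw [← Bool.not_eq_true, entLE_iff] at h
  omega

theorem entLE_trans (a b c : Int × Int) (h1 : entLE a b = true) (h2 : entLE b c = true) :
    entLE a c = true := by
  rw [entLE_iff] at *
  omega

theorem entLE_weaken (a b : Int × Int) (c : Int) (h : entLE a b = true) (hc : c ≤ a.2) :
    entLE (a.1, c) b = true := by
  rw [entLE_iff] at *
  simp only at *
  omega

theorem mem_hpush (l : List (Int × Int)) (e x : Int × Int) :
    x ∈ hpush l e ↔ x = e ∨ x ∈ l := by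
  induction l with
  | nil => simp [hpush]
  | cons a t ih =>
    rw [hpush]
    split
    · simp
    · simp only [List.mem_cons, ih]
      tauto

theorem sorted_hpush (l : List (Int × Int)) (e : Int × Int) (h : SortedQ l) :
    SortedQ (hpush l e) := by
  induction l with
  | nil => simp [hpush, SortedQ]
  | cons a t ih =>
    rw [SortedQ, List.pairwise_cons] at h
    obtain ⟨ha, ht⟩ := h
    rw [hpush]
    split
    · rename_i he
      rw [SortedQ, List.pairwise_cons]
      refine ⟨?_, ?_⟩
      · intro y hy
        rcases List.mem_cons.mp hy with rfl | hy'
        · exact he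
        · exact entLE_trans e a y he (ha y hy')
      · exact List.pairwise_cons.mpr ⟨ha, ht⟩
    · rename_i he
      rw [SortedQ, List.pairwise_cons]
      refine ⟨?_, ih ht⟩
      intro y hy
      rcases (mem_hpush t e y).mp hy with hye | hy'
      · subst hye
        exact entLE_total y a (Bool.eq_false_iff.mpr he)
      · exact ha y hy'

theorem sorted_dropWhile (p : Int × Int → Bool) (q : List (Int × Int)) (h : SortedQ q) :
    SortedQ (q.dropWhile p) := List.Pairwise.sublist (List.dropWhile_sublist p) h

theorem counts_dropWhile (p : Int × Int → Bool) (q : List (Int × Int)) (h : CountsQ q) :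
    CountsQ (q.dropWhile p) := fun e he => h e ((List.dropWhile_sublist p).subset he)

theorem stepQueue_sorted (apples days : List Int) (n i : Nat) (q : List (Int × Int))
    (h : SortedQ q) : SortedQ (stepQueue apples days n i q) := by
  unfold stepQueue
  have h1 := sorted_dropWhile (fun e => decide (e.1 ≤ (i : Int))) q h
  split
  · exact sorted_hpush _ _ h1
  · exact h1

theorem stepQueue_counts (apples days : List Int) (n i : Nat) (q : List (Int × Int))
    (h : CountsQ q) : CountsQ (stepQueue apples days n i q) := by
  unfold stepQueue
  have h1 := counts_dropWhile (fun e => decide (e.1 ≤ (i : Int))) q h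
  split
  · rename_i hc
    intro e he
    rcases (mem_hpush _ _ e).mp he with hye | he'
    · subst hye
      exact hc.2
    · exact h1 e he'
  · exact h1

theorem eatQ_sorted (q : List (Int × Int)) (h : SortedQ q) : SortedQ (eatQ q) := by
  cases q with
  | nil => simpa [eatQ] using h
  | cons e t =>
    obtain ⟨r, c⟩ := e
    rw [SortedQ, List.pairwise_cons] at h
    rw [eatQ]
    split
    · exact h.2
    · rw [SortedQ, List.pairwise_cons]
      exact ⟨fun y hy => entLE_weaken (r, c) y (c - 1) (h.1 y hy) (by omega), h.2⟩

theorem eatQ_counts (q : List (Int × Int)) (h : CountsQ q) : CountsQ (eatQ q) := by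
  cases q with
  | nil => simpa [eatQ] using h
  | cons e t =>
    obtain ⟨r, c⟩ := e
    rw [eatQ]
    split
    · exact fun e he => h e (by simp [he])
    · rename_i hne
      intro e he
      rcases List.mem_cons.mp he with hye | he'
      · subst hye
        simpa using hne
      · exact h e (by simp [he'])

-- batch arithmetic: one eaten apple folds into the batch
theorem batch_step (rest : List (Int × Int)) (r c day ans : Int)
    (hr : day < r) (hc1 : c ≠ 1) :
    batchLoop ((r, c - 1) :: rest) (day + 1) (ans + 1) = batchLoop ((r, c) :: rest) day ans := by
  simp only [batchLoop]
  by_cases hr1 : r ≤ day + 1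
  · have h1 : batchEat c r day = 1 := by
      unfold batchEat
      split_ifs <;> omega
    rw [if_pos hr1, if_neg (by omega : ¬ r ≤ day), h1]
  · have h1 : day + 1 + batchEat (c - 1) r (day + 1) = day + batchEat c r day := by
      unfold batchEat
      split_ifs <;> omega
    have h2 : ans + 1 + batchEat (c - 1) r (day + 1) = ans + batchEat c r day := by
      unfold batchEat
      split_ifs <;> omega
    rw [if_neg hr1, if_neg (by omega : ¬ r ≤ day), h1, h2]

-- after the last arrival, A's day-by-day loop computes B's batch loop
theorem aloop_eq_batch (apples days : List Int) (n : Nat) :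
    ∀ (μ i : Nat) (q : List (Int × Int)) (ans : Int), potQ i q ≤ μ → n ≤ i →
      SortedQ q → CountsQ q →
      eatenApplesLoop apples days n i q ans = batchLoop q (i : Int) ans := by
  intro μ
  induction μ with
  | zero =>
    intro i q ans hμ hn hs hc
    cases q with
    | nil => rw [eatenApplesLoop, dif_neg (by simp; omega), batchLoop]
    | cons e t => have := potQ_pos i (e :: t) (by simp); omega
  | succ μ ih =>
    intro i q ans hμ hn hs hc
    cases q with
    | nil => rw [eatenApplesLoop, dif_neg (by simp; omega), batchLoop]
    | cons e t =>
      obtain ⟨r, c⟩ := e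
      have hcast : ((i + 1 : Nat) : Int) = (i : Int) + 1 := by push_cast; ring
      have hstep : stepQueue apples days n i ((r, c) :: t)
          = ((r, c) :: t).dropWhile (fun e => decide (e.1 ≤ (i : Int))) := by
        unfold stepQueue
        rw [if_neg (by omega)]
      have hq1 : c ≠ 0 := hc (r, c) (by simp)
      have hscons := hs
      rw [SortedQ, List.pairwise_cons] at hscons
      by_cases hr : r ≤ (i : Int)
      · -- the head is expired: A drops it, B skips it
        have hdw : ((r, c) :: t).dropWhile (fun e => decide (e.1 ≤ (i : Int)))
            = t.dropWhile (fun e => decide (e.1 ≤ (i : Int))) := by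
          rw [List.dropWhile_cons]
          simp [hr]
        rw [eatenApplesLoop, dif_pos (Or.inr (by simp)), hstep, hdw]
        have hbat : batchLoop ((r, c) :: t) (i : Int) ans = batchLoop t (i : Int) ans := by
          simp only [batchLoop]
          rw [if_pos hr]
        rw [hbat]
        cases ht : t with
        | nil =>
          rw [eatenApplesLoop]
          simp [eatQ, ateQ, batchLoop]
          omega
        | cons y ys =>
          have hstept : stepQueue apples days n i t
              = t.dropWhile (fun e => decide (e.1 ≤ (i : Int))) := by
            unfold stepQueue
            rw [if_neg (by omega)]
          have hpot : potQ i t ≤ μ := by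
            have := potQ_cons i (r, c) t
            omega
          rw [← ht]
          have hback : eatenApplesLoop apples days n i t ans
              = eatenApplesLoop apples days n (i + 1)
                  (eatQ (t.dropWhile (fun e => decide (e.1 ≤ (i : Int)))))
                  (ans + ateQ (t.dropWhile (fun e => decide (e.1 ≤ (i : Int))))) := by
            rw [eatenApplesLoop, dif_pos (Or.inr (by rw [ht]; simp)), hstept]
          rw [← hback]
          exact ih i t ans hpot hn hscons.2 (fun e he => hc e (by simp [he]))
      · -- the head is alive: A eats one from it
        have hdw : ((r, c) :: t).dropWhile (fun e => decide (e.1 ≤ (i : Int)))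
            = (r, c) :: t := by
          rw [List.dropWhile_cons]
          simp [hr]
        rw [eatenApplesLoop, dif_pos (Or.inr (by simp)), hstep, hdw]
        have hpots : potQ (i + 1) t ≤ potQ i t := potQ_succ_le i t
        have hpc := potQ_cons i (r, c) t
        have hhead : 2 ≤ (r - (i : Int)).toNat + 1 := by omega
        by_cases hco : c = 1
        · subst hco
          have heq : eatQ ((r, 1) :: t) = t := by rw [eatQ]; norm_num
          have hate : ateQ ((r, 1) :: t) = 1 := rfl
          rw [heq, hate]
          have hrec := ih (i + 1) t (ans + 1) (by omega) (by omega) hscons.2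
            (fun e he => hc e (by simp [he]))
          rw [hrec, hcast]
          simp only [batchLoop]
          rw [if_neg hr]
          have hmin : batchEat 1 r (i : Int) = 1 := by
            unfold batchEat
            split_ifs <;> omega
          rw [hmin]
        · have heq : eatQ ((r, c) :: t) = (r, c - 1) :: t := by
            rw [eatQ, if_neg (by omega)]
          have hate : ateQ ((r, c) :: t) = 1 := rfl
          rw [heq, hate]
          have hsort' : SortedQ ((r, c - 1) :: t) := by
            rw [SortedQ, List.pairwise_cons]
            exact ⟨fun y hy => entLE_weaken (r, c) y (c - 1) (hscons.1 y hy) (by omega),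
              hscons.2⟩
          have hcnt' : CountsQ ((r, c - 1) :: t) := by
            intro e he
            rcases List.mem_cons.mp he with hye | he'
            · subst hye
              simp only
              intro hz
              exact hco (by omega)
            · exact hc e (by simp [he'])
          have hpot' : potQ (i + 1) ((r, c - 1) :: t) ≤ μ := by
            have h1 := potQ_cons (i + 1) (r, c - 1) t
            have h2 : ((i + 1 : Nat) : Int) = (i : Int) + 1 := by push_cast; ring
            rw [h2] at h1
            simp only at h1
            omega
          have hrec := ih (i + 1) ((r, c - 1) :: t) (ans + 1) hpot' (by omega) hsort' hcnt'
          rw [hrec, hcast]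
          exact batch_step t r c (i : Int) ans (by omega) hco

-- the arrival phase: the two loops run in lockstep, then the batch lemma applies
theorem aloop_eq_bArrive (apples days : List Int) (n : Nat) :
    ∀ (k i : Nat) (q : List (Int × Int)) (ans : Int), n - i ≤ k →
      SortedQ q → CountsQ q →
      eatenApplesLoop apples days n i q ans = bArrive apples days n i q ans := by
  intro k
  induction k with
  | zero =>
    intro i q ans hk hs hc
    rw [bArrive, if_neg (by omega)]
    exact aloop_eq_batch apples days n (potQ i q) i q ans le_rfl (by omega) hs hc
  | succ k ih =>
    intro i q ans hk hs hc
    by_cases hi : i < n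
    · have hQ : stepQueueB apples days i q = stepQueue apples days n i q := by
        unfold stepQueue stepQueueB
        by_cases hz : apples.getD i 0 ≠ 0
        · rw [if_pos hz, if_pos ⟨hi, hz⟩]
        · rw [if_neg hz, if_neg (by tauto)]
      have hss := stepQueue_sorted apples days n i q hs
      have hsc := stepQueue_counts apples days n i q hc
      rw [eatenApplesLoop, dif_pos (Or.inl hi), bArrive, if_pos hi, hQ]
      exact ih (i + 1) _ _ (by omega) (eatQ_sorted _ hss) (eatQ_counts _ hsc)
    · rw [bArrive, if_neg hi]
      exact aloop_eq_batch apples days n (potQ i q) i q ans le_rfl (by omega) hs hc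

-- ===== VERDICT (by name: the statement is the Claim_ definition above) =====
theorem eatenApples_spec : Claim_equal_eatenApples := by
  intro apples days _ _
  unfold Spec_eatenApples eatenApples eatenApples_alt
  exact aloop_eq_bArrive apples days apples.length apples.length 0 [] 0
    (by omega) (by simp [SortedQ]) (by simp [CountsQ])
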